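-- pv_equiv track=rewrite | github.com/deren-teo/advent-of-code-2024 | day19/day19.py | part2
-- ===== SOURCE A (Python) =====
-- from typing import Dict, List, Set, Tuple
--
-- def counting_search(substrings: List[str], target: str, cache: Dict[str, int]) -> int:
--     """
--     Recursively attempts to match a substring to the start of the target string.
--     Returns the number of substring combinations (with replacement) which can
--     produce the target.
--     """
--     options = 0
--
--     for s in substrings:
--         if s == target:
--             options += 1
--             continue
--         if target.startswith(s):
--             if (new_target := target[len(s):]) not in cache:
--                 counting_search(substrings, new_target, cache)
--             options += cache[new_target]
--
--     cache[target] = options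
--     return options
--
-- def part2(towels: List[str], patterns: List[str]) -> int:
--     """
--     Returns the sum of the number of ways each pattern can be produced as a
--     combination (with replacement) of the given towels.
--     """
--     options = 0
--     for pattern in patterns:
--         relevant_towels = {t for t in towels if t in pattern}
--         if len(relevant_towels) == 0:
--             continue
--         options += counting_search(relevant_towels, pattern, dict())
--     return options
-- ===== SOURCE B (Python) =====
-- def part2(towels, patterns):
--     """
--     Bottom-up tabulation instead of memoized recursion: for each pattern,
--     dp[i] counts the nonempty towel sequences concatenating to pattern[i:];
--     the answer is the summed dp[0]. Towels are deduplicated once up front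
--     and narrowed per pattern to the substrings of the pattern.
--     """
--     ts = set(towels)
--     total = 0
--     for pattern in patterns:
--         rel = [t for t in ts if t in pattern]
--         n = len(pattern)
--         dp = [0] * (n + 1)
--         for m in range(1, n + 1):
--             i = n - m
--             c = 0
--             for t in rel:
--                 j = i + len(t)
--                 if j <= n and pattern[i:j] == t:
--                     c += 1 if j == n else dp[j]
--             dp[i] = c
--         total += dp[0]
--     return total
-- ===== Notes on version B (the rewrite author's own statement) =====
-- stated objective: alternative
-- what changed: Replaces A's per-pattern memoized recursion over suffix strings (cache dict threaded through recursive calls) by an explicit bottom-up DP table over suffix start positions, with the towels deduplicated once and narrowed per pattern by a substring filter.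
-- outside the precondition, e.g. on part2([''], ['a']): A raises RecursionError, B returns 0; on part2([''], ['']): A returns 1, B returns 0
import Mathlib
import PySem

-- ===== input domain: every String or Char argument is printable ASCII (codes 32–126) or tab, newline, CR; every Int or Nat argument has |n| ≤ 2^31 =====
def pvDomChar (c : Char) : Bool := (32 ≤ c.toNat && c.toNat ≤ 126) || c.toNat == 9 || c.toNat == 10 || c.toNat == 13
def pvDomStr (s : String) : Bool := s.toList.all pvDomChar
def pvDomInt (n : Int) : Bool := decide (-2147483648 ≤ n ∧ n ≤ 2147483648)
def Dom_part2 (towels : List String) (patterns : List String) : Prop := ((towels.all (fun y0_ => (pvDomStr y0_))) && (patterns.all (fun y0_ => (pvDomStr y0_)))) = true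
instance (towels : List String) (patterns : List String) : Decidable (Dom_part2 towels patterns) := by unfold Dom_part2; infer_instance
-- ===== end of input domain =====

-- B replaces A's per-pattern memoized recursion by a bottom-up DP table over suffix positions (alternative decomposition, similar cost).


-- ===== PORT A =====
-- counting_search: the cache dict is mutated, so the port threads it and returns (options, cache).
-- fuel makes the recursion total; fuel = 0 is unreachable under Pre_part2 (every towel nonempty,
-- top-level fuel len(pattern)+1), exactly where Python would recurse without bound.
def countingSearch (fuel : Nat) (substrings : List String) (target : String)
    (cache : PySem.Dict String Int) : Int × PySem.Dict String Int :=
  match fuel with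
  | 0 => (0, cache)
  | fuel + 1 =>
    let st := substrings.foldl (fun (st : Int × PySem.Dict String Int) s =>
      if s == target then (st.1 + 1, st.2)
      else if PySem.Str.startswith target s then
        let newTarget := PySem.Str.slice target (some (PySem.Str.len s)) none
        let cache' := if st.2.contains newTarget then st.2
          else (countingSearch fuel substrings newTarget st.2).2
        -- options += cache[new_target]; the key is present under Pre_part2 (getD default unreachable)
        (st.1 + cache'.getD newTarget 0, cache')
      else st) (0, cache)
    (st.1, st.2.insert target st.1)

def part2 (towels : List String) (patterns : List String) : Int :=
  patterns.foldl (fun options pattern =>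
    let relevantTowels : PySem.Set String :=
      PySem.Set.ofList (towels.filter (fun t => PySem.Str.isIn t pattern))
    if relevantTowels.length = 0 then options
    else options +
      (countingSearch ((PySem.Str.len pattern).toNat + 1) relevantTowels pattern PySem.Dict.empty).1) 0

-- ===== PORT B =====
def part2_alt (towels : List String) (patterns : List String) : Int :=
  let ts : PySem.Set String := PySem.Set.ofList towels
  patterns.foldl (fun total pattern =>
    let rel : List String := ts.filter (fun t => PySem.Str.isIn t pattern)
    let n : Int := PySem.Str.len pattern
    let dp0 : List Int := List.replicate (n + 1).toNat 0
    let dp := (PySem.List.pyRange 1 (n + 1) 1).foldl (fun dp m =>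
      let i : Int := n - m
      let c := rel.foldl (fun c t =>
        let j : Int := i + PySem.Str.len t
        if j ≤ n && PySem.Str.slice pattern (some i) (some j) == t then
          c + (if j == n then 1 else PySem.List.pyGetD dp j 0)
        else c) 0
      -- dp[i] = c; 1 ≤ m ≤ n so 0 ≤ i < n: the index is in range, no wraparound
      dp.set i.toNat c) dp0
    total + PySem.List.pyGetD dp 0 0) 0

-- ===== PRECONDITION & SPEC =====
-- Pre_part2 excludes towel lists containing the empty string (unless there are no patterns at
-- all): there A recurses without bound (RecursionError) on any nonempty pattern, and on
-- all-empty-pattern inputs A's count of 1 per pattern via the empty towel is a degenerate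
-- corner where B counts 0.
def Pre_part2 (towels : List String) (patterns : List String) : Prop :=
  "" ∉ towels ∨ patterns = []
instance (towels : List String) (patterns : List String) : Decidable (Pre_part2 towels patterns) := by
  unfold Pre_part2; infer_instance
def pvWitness_part2 : List String × List String := (["a", "ab", "b"], ["aab", "ba"])
def Spec_part2 (towels : List String) (patterns : List String) (out : Int) : Prop := out = part2_alt towels patterns
instance (towels : List String) (patterns : List String) (out : Int) : Decidable (Spec_part2 towels patterns out) := by unfold Spec_part2; infer_instance

-- ===== CLAIM (what is proved, stated in full; the proofs are below) =====
def Claim_equal_part2 : Prop := ∀ (towels : List String) (patterns : List String), Dom_part2 towels patterns → Pre_part2 towels patterns → Spec_part2 towels patterns (part2 towels patterns)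

-- ===== LEMMAS AND PROOFS =====

def Wf (fuel : Nat) (ss : List (List Char)) (t : List Char) : Int :=
  match fuel with
  | 0 => 0
  | fuel + 1 =>
    (ss.map (fun s =>
      if s = t then (1 : Int)
      else if s ≠ [] ∧ s <+: t then Wf fuel ss (t.drop s.length)
      else 0)).sum

def W (ss : List (List Char)) (t : List Char) : Int := Wf (t.length + 1) ss t

theorem Wf_fuel : ∀ (fuel f : Nat) (ss : List (List Char)) (t : List Char),
    t.length < fuel → t.length < f → Wf fuel ss t = Wf f ss t := by
  intro fuel
  induction fuel with
  | zero => intro f ss t h _; omega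
  | succ fuel ih =>
    intro f ss t hfuel hf
    match f with
    | f + 1 =>
      simp only [Wf]
      congr 1
      apply List.map_congr_left
      intro s _
      split_ifs with h1 h2
      · rfl
      · have hlen : s.length ≤ t.length := h2.2.length_le
        have hpos : 0 < s.length := List.length_pos_iff.mpr h2.1
        have hd : (t.drop s.length).length = t.length - s.length := by
          simp [List.length_drop]
        exact ih f ss (t.drop s.length) (by omega) (by omega)
      · rfl

theorem W_unfold (ss : List (List Char)) (t : List Char) :
    W ss t = (ss.map (fun s =>
      if s = t then (1 : Int)
      else if s ≠ [] ∧ s <+: t then W ss (t.drop s.length)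
      else 0)).sum := by
  simp only [W]
  conv_lhs => rw [Wf]
  congr 1
  apply List.map_congr_left
  intro s _
  split_ifs with h1 h2
  · rfl
  · have hlen : s.length ≤ t.length := h2.2.length_le
    have hpos : 0 < s.length := List.length_pos_iff.mpr h2.1
    have hd : (t.drop s.length).length = t.length - s.length := by simp [List.length_drop]
    exact Wf_fuel t.length ((t.drop s.length).length + 1) ss (t.drop s.length) (by omega) (by omega)
  · rfl

theorem W_nil_of_nonempty (ss : List (List Char)) (h : ∀ s ∈ ss, s ≠ []) : W ss [] = 0 := by
  rw [W_unfold]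
  have : ∀ s ∈ ss, (if s = ([] : List Char) then (1 : Int)
      else if s ≠ [] ∧ s <+: [] then W ss (List.drop s.length []) else 0) = 0 := by
    intro s hs
    have hne := h s hs
    simp [hne, List.prefix_nil]
  rw [List.map_congr_left this]
  simp

theorem sum_map_filter_of_zero (p : List Char → Bool) (g : List Char → Int) (l : List (List Char))
    (h : ∀ s ∈ l, p s = false → g s = 0) :
    ((l.filter p).map g).sum = (l.map g).sum := by
  induction l with
  | nil => rfl
  | cons x xs ih =>
    have ih' := ih (fun s hs hp => h s (by simp [hs]) hp)
    by_cases hx : p x = true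
    · simp [hx, ih']
    · simp only [Bool.not_eq_true] at hx
      simp [hx, ih', h x (by simp) hx]

theorem W_filter_aux (p : List Char → Bool) (ss : List (List Char)) (cs : List Char)
    (hp : ∀ s ∈ ss, s <:+: cs → p s = true) :
    ∀ (n : Nat) (t : List Char), t.length ≤ n → t <:+: cs → W (ss.filter p) t = W ss t := by
  intro n
  induction n with
  | zero =>
    intro t ht hinf
    have : t = [] := List.length_eq_zero_iff.mp (by omega)
    subst this
    rw [W_unfold, W_unfold]
    have hcong : ∀ s ∈ ss.filter p,
        (if s = ([] : List Char) then (1 : Int) else if s ≠ [] ∧ s <+: [] then W (ss.filter p) (List.drop s.length []) else 0)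
        = (if s = ([] : List Char) then (1 : Int) else if s ≠ [] ∧ s <+: [] then W ss (List.drop s.length []) else 0) := by
      intro s _
      split_ifs with h1 h2
      · rfl
      · exact (h2.1 (List.prefix_nil.mp h2.2)).elim
      · rfl
    rw [List.map_congr_left hcong]
    apply sum_map_filter_of_zero
    intro s hs hps
    have h1 : s ≠ [] := by
      rintro rfl; exact absurd (hp [] hs (by simp [List.nil_infix])) (by simp [hps])
    simp [h1, List.prefix_nil]
  | succ n ihn =>
    intro t ht hinf
    rw [W_unfold, W_unfold]
    have hcong : ∀ s ∈ ss.filter p,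
        (if s = t then (1 : Int) else if s ≠ [] ∧ s <+: t then W (ss.filter p) (t.drop s.length) else 0)
        = (if s = t then (1 : Int) else if s ≠ [] ∧ s <+: t then W ss (t.drop s.length) else 0) := by
      intro s _
      split_ifs with h1 h2
      · rfl
      · have hpos : 0 < s.length := List.length_pos_iff.mpr h2.1
        have hlen : s.length ≤ t.length := h2.2.length_le
        have hd : (t.drop s.length).length = t.length - s.length := by simp [List.length_drop]
        exact ihn (t.drop s.length) (by omega) ((List.drop_suffix _ _).isInfix.trans hinf)
      · rfl
    rw [List.map_congr_left hcong]
    apply sum_map_filter_of_zero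
    intro s hs hps
    have h1 : s ≠ t := by
      rintro rfl; exact absurd (hp s hs hinf) (by simp [hps])
    have h2 : ¬ (s ≠ [] ∧ s <+: t) := by
      rintro ⟨hne, hpre⟩
      exact absurd (hp s hs (hpre.isInfix.trans hinf)) (by simp [hps])
    simp [h1, h2]

theorem W_filter (p : List Char → Bool) (ss : List (List Char)) (cs : List Char)
    (hp : ∀ s ∈ ss, s <:+: cs → p s = true)
    (t : List Char) (hinf : t <:+: cs) : W (ss.filter p) t = W ss t :=
  W_filter_aux p ss cs hp t.length t le_rfl hinf

theorem ofList_filter_aux (p : String → Bool) :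
    ∀ (l : List String) (acc : List String),
      (l.foldl PySem.Set.add acc).filter p = (l.filter p).foldl PySem.Set.add (acc.filter p) := by
  intro l
  induction l with
  | nil => intro acc; rfl
  | cons x xs ih =>
    intro acc
    have key : (PySem.Set.add acc x).filter p =
        if p x = true then PySem.Set.add (acc.filter p) x else acc.filter p := by
      by_cases hmem : x ∈ acc
      · have h1 : PySem.Set.add acc x = acc := by simp [PySem.Set.add, PySem.Set.contains, hmem]
        rw [h1]
        split_ifs with hx
        · have hin : x ∈ acc.filter p := List.mem_filter.mpr ⟨hmem, hx⟩
          simp [PySem.Set.add, PySem.Set.contains, hin]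
        · rfl
      · have h1 : PySem.Set.add acc x = acc ++ [x] := by simp [PySem.Set.add, PySem.Set.contains, hmem]
        rw [h1, List.filter_append]
        split_ifs with hx
        · have hnm : x ∉ acc.filter p := fun hc => hmem (List.mem_of_mem_filter hc)
          simp [PySem.Set.add, PySem.Set.contains, hnm, hx]
        · simp [hx]
    by_cases hx : p x = true
    · simp only [List.foldl_cons, List.filter_cons, hx, if_true]
      rw [ih, key, if_pos hx]
    · have hx' : p x = false := by simpa using hx
      simp only [List.foldl_cons, List.filter_cons, hx']
      rw [ih, key, if_neg (by simp [hx'])]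
      simp
theorem ofList_filter (p : String → Bool) (l : List String) :
    PySem.Set.ofList (l.filter p) = (PySem.Set.ofList l).filter p := by
  rw [PySem.Set.ofList_eq_foldl, PySem.Set.ofList_eq_foldl, ofList_filter_aux]
  rfl


def CacheOK (ss : List String) (c : PySem.Dict String Int) : Prop :=
  ∀ k v, c.get? k = some v → v = W (ss.map String.toList) k.toList

theorem cs_fold (fuel : Nat) (ss : List String) (hne : ∀ s ∈ ss, s ≠ "") (t : String)
    (hf : t.toList.length ≤ fuel)
    (IH : ∀ (t' : String) (cache : PySem.Dict String Int), t'.toList.length < fuel → CacheOK ss cache →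
      (countingSearch fuel ss t' cache).1 = W (ss.map String.toList) t'.toList ∧
      CacheOK ss (countingSearch fuel ss t' cache).2 ∧
      (countingSearch fuel ss t' cache).2.get? t' = some (W (ss.map String.toList) t'.toList)) :
    ∀ (l : List String), (∀ s ∈ l, s ∈ ss) → ∀ (opts : Int) (c : PySem.Dict String Int), CacheOK ss c →
    (l.foldl (fun (st : Int × PySem.Dict String Int) s =>
      if s == t then (st.1 + 1, st.2)
      else if PySem.Str.startswith t s then
        let newTarget := PySem.Str.slice t (some (PySem.Str.len s)) none
        let cache' := if st.2.contains newTarget then st.2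
          else (countingSearch fuel ss newTarget st.2).2
        (st.1 + cache'.getD newTarget 0, cache')
      else st) (opts, c)).1
      = opts + (l.map (fun s => if s.toList = t.toList then (1:Int)
          else if s.toList ≠ [] ∧ s.toList <+: t.toList then W (ss.map String.toList) (t.toList.drop s.toList.length)
          else 0)).sum ∧
    CacheOK ss (l.foldl (fun (st : Int × PySem.Dict String Int) s =>
      if s == t then (st.1 + 1, st.2)
      else if PySem.Str.startswith t s then
        let newTarget := PySem.Str.slice t (some (PySem.Str.len s)) none
        let cache' := if st.2.contains newTarget then st.2
          else (countingSearch fuel ss newTarget st.2).2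
        (st.1 + cache'.getD newTarget 0, cache')
      else st) (opts, c)).2 := by
  intro l
  induction l with
  | nil => intro _ opts c hc; exact ⟨by simp, hc⟩
  | cons s l ihl =>
    intro hmem opts c hc
    have hs : s ∈ ss := hmem s (by simp)
    have hsne : s ≠ "" := hne s hs
    have hsl : s.toList ≠ [] := fun h0 => hsne (String.toList_inj.mp (by simpa using h0))
    simp only [List.foldl_cons, List.map_cons, List.sum_cons]
    by_cases heq : s == t
    · have hstr : s = t := by exact_mod_cast eq_of_beq heq
      rw [if_pos heq]
      have := ihl (fun x hx => hmem x (by simp [hx])) (opts + 1) c hc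
      refine ⟨?_, this.2⟩
      rw [this.1, if_pos (by rw [hstr])]
      ring
    · rw [if_neg (by simpa using heq)]
      have hne_t : s.toList ≠ t.toList := by
        intro h; apply heq; simp [String.toList_inj.mp h]
      by_cases hpre : PySem.Str.startswith t s
      · rw [if_pos hpre]
        have hprefix : s.toList <+: t.toList := by
          rw [PySem.Str.startswith_eq] at hpre
          exact (PySem.Chars.startswith_iff _ _).mp hpre
        have hlen : s.toList.length ≤ t.toList.length := hprefix.length_le
        have hspos : 0 < s.toList.length := List.length_pos_iff.mpr hsl
        -- the new target and its list form
        set newTarget := PySem.Str.slice t (some (PySem.Str.len s)) none with hnt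
        have hntl : newTarget.toList = t.toList.drop s.toList.length := by
          rw [hnt, PySem.Str.toList_slice, PySem.Chars.slice_eq_listSlice,
            PySem.List.slice_from _ (by rw [PySem.Str.len_eq]; positivity)]
          simp [PySem.Str.len_eq]
        have hntlen : newTarget.toList.length < fuel := by
          rw [hntl]; simp only [List.length_drop]; omega
        by_cases hcont : c.contains newTarget
        · rw [if_pos hcont]  -- may need adjusting for let structure
          obtain ⟨v, hv⟩ : ∃ v, c.get? newTarget = some v := by
            rw [PySem.Dict.contains_eq_isSome_get?] at hcont
            exact Option.isSome_iff_exists.mp hcont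
          have hvW : v = W (ss.map String.toList) newTarget.toList := hc _ _ hv
          have hgetD : c.getD newTarget 0 = v := PySem.Dict.getD_of_get?_eq_some c 0 hv
          have := ihl (fun x hx => hmem x (by simp [hx])) (opts + c.getD newTarget 0) c hc
          refine ⟨?_, this.2⟩
          rw [this.1, if_neg hne_t, if_pos ⟨hsl, hprefix⟩, hgetD, hvW, hntl]
          ring
        · rw [if_neg hcont]
          have hrec := IH newTarget c hntlen hc
          have hgetD : (countingSearch fuel ss newTarget c).2.getD newTarget 0
              = W (ss.map String.toList) newTarget.toList :=
            PySem.Dict.getD_of_get?_eq_some _ 0 hrec.2.2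
          have := ihl (fun x hx => hmem x (by simp [hx]))
            (opts + (countingSearch fuel ss newTarget c).2.getD newTarget 0)
            (countingSearch fuel ss newTarget c).2 hrec.2.1
          refine ⟨?_, this.2⟩
          rw [this.1, if_neg hne_t, if_pos ⟨hsl, hprefix⟩, hgetD, hntl]
          ring
      · rw [if_neg hpre]
        have hnpre : ¬ s.toList <+: t.toList := by
          intro h
          apply hpre
          rw [PySem.Str.startswith_eq]
          exact (PySem.Chars.startswith_iff _ _).mpr h
        have := ihl (fun x hx => hmem x (by simp [hx])) opts c hc
        refine ⟨?_, this.2⟩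
        rw [this.1, if_neg hne_t, if_neg (by rintro ⟨_, h⟩; exact hnpre h)]
        ring

theorem cs_correct : ∀ (fuel : Nat) (ss : List String), (∀ s ∈ ss, s ≠ "") →
    ∀ (t : String) (cache : PySem.Dict String Int), t.toList.length < fuel → CacheOK ss cache →
    (countingSearch fuel ss t cache).1 = W (ss.map String.toList) t.toList ∧
    CacheOK ss (countingSearch fuel ss t cache).2 ∧
    (countingSearch fuel ss t cache).2.get? t = some (W (ss.map String.toList) t.toList) := by
  intro fuel
  induction fuel with
  | zero => intro ss _ t cache h; omega
  | succ fuel ih =>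
    intro ss hne t cache hf hc
    have hfold := cs_fold fuel ss hne t (by omega) (fun t' c h1 h2 => ih ss hne t' c h1 h2)
      ss (fun x hx => hx) 0 cache hc
    set F := ss.foldl (fun (st : Int × PySem.Dict String Int) s =>
      if s == t then (st.1 + 1, st.2)
      else if PySem.Str.startswith t s then
        let newTarget := PySem.Str.slice t (some (PySem.Str.len s)) none
        let cache' := if st.2.contains newTarget then st.2
          else (countingSearch fuel ss newTarget st.2).2
        (st.1 + cache'.getD newTarget 0, cache')
      else st) (0, cache) with hFdef
    have hF : countingSearch (fuel + 1) ss t cache = (F.1, F.2.insert t F.1) := by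
      rw [hFdef]; rfl
    have hval : F.1 = W (ss.map String.toList) t.toList := by
      rw [hfold.1, W_unfold, List.map_map, zero_add]
      rfl
    rw [hF]
    refine ⟨hval, ?_, ?_⟩
    · intro k v hk
      by_cases hkt : k = t
      · subst hkt
        simp only [PySem.Dict.get?_insert_self] at hk
        rw [← Option.some_inj.mp hk, hval]
      · simp only [PySem.Dict.get?_insert_of_ne _ _ hkt] at hk
        exact hfold.2 k v hk
    · simp only [PySem.Dict.get?_insert_self, hval]

theorem dpInnerSum (ts : List String) (hne : ∀ t ∈ ts, t ≠ "") (pattern : String)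
    (dp : List Int) (iN : Nat) (hiN : iN < pattern.toList.length)
    (hdp : ∀ j : Nat, iN < j → j < pattern.toList.length →
      dp.getD j 0 = W (ts.map String.toList) (pattern.toList.drop j)) :
    ts.foldl (fun c t =>
      if (decide ((iN : Int) + PySem.Str.len t ≤ (pattern.toList.length : Int)) &&
          (PySem.Str.slice pattern (some (iN : Int)) (some ((iN : Int) + PySem.Str.len t)) == t)) then
        c + (if ((iN : Int) + PySem.Str.len t) == (pattern.toList.length : Int) then 1
             else PySem.List.pyGetD dp ((iN : Int) + PySem.Str.len t) 0)
      else c) 0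
    = W (ts.map String.toList) (pattern.toList.drop iN) := by
  set cs := pattern.toList with hcs
  set n := cs.length with hn
  rw [PySem.List.foldl_congr_mem ts _
    (fun (c : Int) t =>
      c + (if (decide ((iN : Int) + PySem.Str.len t ≤ (n : Int)) &&
          (PySem.Str.slice pattern (some (iN : Int)) (some ((iN : Int) + PySem.Str.len t)) == t)) then
        (if ((iN : Int) + PySem.Str.len t) == (n : Int) then 1
             else PySem.List.pyGetD dp ((iN : Int) + PySem.Str.len t) 0)
      else 0)) 0
    (by
      intro acc t _
      by_cases hb : (decide ((iN : Int) + PySem.Str.len t ≤ (n : Int)) &&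
          (PySem.Str.slice pattern (some (iN : Int)) (some ((iN : Int) + PySem.Str.len t)) == t)) = true
      · simp only [if_pos hb]
      · simp only [if_neg hb, add_zero])]
  rw [PySem.List.foldl_add, zero_add, W_unfold, List.map_map]
  apply congrArg
  apply List.map_congr_left
  intro t ht
  simp only [Function.comp_apply]
  have htne : t.toList ≠ [] := fun h0 => (hne t ht) (String.toList_inj.mp (by simpa using h0))
  have hL : 0 < t.toList.length := List.length_pos_iff.mpr htne
  set L := t.toList.length with hLdef
  have hlen_t : PySem.Str.len t = (L : Int) := by rw [PySem.Str.len_eq]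
  have hslice : (PySem.Str.slice pattern (some (iN : Int)) (some ((iN : Int) + PySem.Str.len t))).toList
      = List.take L (List.drop iN cs) := by
    rw [PySem.Str.toList_slice, PySem.Chars.slice_eq_listSlice, hlen_t]
    have : (iN : Int) + (L : Int) = ((iN + L : Nat) : Int) := by push_cast; ring
    rw [this, PySem.List.slice_natCast]
    congr 1
    omega
  by_cases hpre : t.toList <+: cs.drop iN
  · have hLle : iN + L ≤ n := by
      have := hpre.length_le
      simp only [List.length_drop] at this
      omega
    have hteq : List.take L (List.drop iN cs) = t.toList :=
      (List.prefix_iff_eq_take.mp hpre).symm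
    have hcond : (decide ((iN : Int) + PySem.Str.len t ≤ (n : Int)) &&
        (PySem.Str.slice pattern (some (iN : Int)) (some ((iN : Int) + PySem.Str.len t)) == t)) = true := by
      simp only [Bool.and_eq_true, decide_eq_true_eq, beq_iff_eq]
      refine ⟨by rw [hlen_t]; exact_mod_cast hLle, ?_⟩
      rw [← String.toList_inj, hslice, hteq]
    rw [if_pos hcond]
    by_cases hend : iN + L = n
    · have : t.toList = cs.drop iN := by
        rw [← hteq]
        apply List.take_of_length_le
        simp only [List.length_drop]
        omega
      rw [if_pos (by rw [hlen_t]; simp only [beq_iff_eq]; exact_mod_cast hend)]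
      rw [if_pos this]
    · have hlt : iN + L < n := by omega
      have hne_drop : t.toList ≠ cs.drop iN := by
        intro h
        have := congrArg List.length h
        simp only [List.length_drop] at this
        omega
      rw [if_neg (by rw [hlen_t]; simp only [beq_iff_eq]; intro h; exact hend (by exact_mod_cast h)),
        if_neg hne_drop, if_pos ⟨htne, hpre⟩]
      have : (iN : Int) + PySem.Str.len t = ((iN + L : Nat) : Int) := by rw [hlen_t]; push_cast; ring
      rw [this, PySem.List.pyGetD_of_nonneg _ _ (by positivity), Int.toNat_natCast,
        hdp (iN + L) (by omega) hlt, List.drop_drop]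
  · have hcond : (decide ((iN : Int) + PySem.Str.len t ≤ (n : Int)) &&
        (PySem.Str.slice pattern (some (iN : Int)) (some ((iN : Int) + PySem.Str.len t)) == t)) = false := by
      have h2 : (PySem.Str.slice pattern (some (iN : Int)) (some ((iN : Int) + PySem.Str.len t)) == t) = false := by
        rw [beq_eq_false_iff_ne]
        intro h
        apply hpre
        rw [← String.toList_inj, hslice] at h
        exact List.prefix_iff_eq_take.mpr h.symm
      rw [h2, Bool.and_false]
    rw [if_neg (by rw [hcond]; simp), if_neg (by intro h; exact hpre (by rw [h])),
      if_neg (fun h => hpre h.2)]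

def dpStep (ts : List String) (pattern : String) (dp : List Int) (m : Int) : List Int :=
  dp.set (PySem.Str.len pattern - m).toNat (ts.foldl (fun c t =>
    if (decide ((PySem.Str.len pattern - m) + PySem.Str.len t ≤ PySem.Str.len pattern) &&
        (PySem.Str.slice pattern (some (PySem.Str.len pattern - m))
          (some ((PySem.Str.len pattern - m) + PySem.Str.len t)) == t)) then
      c + (if ((PySem.Str.len pattern - m) + PySem.Str.len t) == PySem.Str.len pattern then 1
           else PySem.List.pyGetD dp ((PySem.Str.len pattern - m) + PySem.Str.len t) 0)
    else c) 0)

theorem dp_inv (ts : List String) (hne : ∀ t ∈ ts, t ≠ "") (pattern : String) :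
    ∀ (M : Nat), M ≤ pattern.toList.length →
    (((PySem.List.pyRange 1 ((M : Int) + 1) 1).foldl (dpStep ts pattern)
        (List.replicate ((PySem.Str.len pattern) + 1).toNat 0)).length
      = pattern.toList.length + 1) ∧
    (∀ j : Nat, ((PySem.List.pyRange 1 ((M : Int) + 1) 1).foldl (dpStep ts pattern)
        (List.replicate ((PySem.Str.len pattern) + 1).toNat 0)).getD j 0
      = if pattern.toList.length - M ≤ j ∧ j < pattern.toList.length
        then W (ts.map String.toList) (pattern.toList.drop j) else 0) := by
  intro M
  induction M with
  | zero =>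
    intro _
    constructor
    · simp [PySem.Str.len_eq]
    · intro j
      rw [if_neg (by omega)]
      simp [List.getD]
  | succ M ihM =>
    intro hM
    have ihM' := ihM (by omega)
    have hcast : ((M + 1 : Nat) : Int) + 1 = ((M : Int) + 1) + 1 := by push_cast; ring
    rw [hcast, PySem.List.pyRange_one_succ_right (by omega), List.foldl_append, List.foldl_cons,
      List.foldl_nil]
    set iN : Nat := pattern.toList.length - M - 1 with hiN
    rw [dpStep, PySem.Str.len_eq pattern]
    rw [PySem.Str.len_eq pattern] at ihM'
    have hi : (pattern.toList.length : Int) - ((M : Int) + 1) = (iN : Nat) := by omega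
    have hc := dpInnerSum ts hne pattern _ iN (by omega) (by
      intro j hj1 hj2
      rw [ihM'.2 j, if_pos (by omega)])
    rw [hi, Int.toNat_natCast, hc]
    constructor
    · rw [List.length_set, ihM'.1]
    · intro j
      rw [List.getD_eq_getElem?_getD, List.getElem?_set]
      by_cases hj : iN = j
      · subst hj
        rw [if_pos rfl, if_pos (by rw [ihM'.1]; omega), if_pos (by omega)]
        rfl
      · rw [if_neg hj, ← List.getD_eq_getElem?_getD, ihM'.2 j]
        by_cases hcond : pattern.toList.length - M ≤ j ∧ j < pattern.toList.length
        · rw [if_pos hcond, if_pos (by omega)]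
        · rw [if_neg hcond, if_neg (by omega)]

theorem W_nil_ss (t : List Char) : W [] t = 0 := by
  rw [W_unfold]; simp

theorem dp_correct (ts : List String) (hne : ∀ t ∈ ts, t ≠ "") (pattern : String) :
    PySem.List.pyGetD ((PySem.List.pyRange 1 (PySem.Str.len pattern + 1) 1).foldl (dpStep ts pattern)
      (List.replicate ((PySem.Str.len pattern) + 1).toNat 0)) 0 0
    = W (ts.map String.toList) pattern.toList := by
  have h := dp_inv ts hne pattern pattern.toList.length le_rfl
  rw [PySem.Str.len_eq pattern] at h
  rw [PySem.Str.len_eq pattern]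
  rw [PySem.List.pyGetD_of_nonneg _ _ le_rfl, show (0:Int).toNat = 0 from rfl, h.2 0]
  by_cases h0 : 0 < pattern.toList.length
  · rw [if_pos ⟨by omega, h0⟩, List.drop_zero]
  · rw [if_neg (by omega)]
    have hnil : pattern.toList = [] := List.length_eq_zero_iff.mp (by omega)
    rw [hnil]
    exact (W_nil_of_nonempty _ (by
      intro s hs
      obtain ⟨t, ht, rfl⟩ := List.mem_map.mp hs
      exact fun h0 => (hne t ht) (String.toList_inj.mp (by simpa using h0)))).symm

theorem relevant_W (towels : List String) (pattern : String) :
    W ((PySem.Set.ofList (towels.filter (fun t => PySem.Str.isIn t pattern))).map String.toList) pattern.toList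
    = W ((PySem.Set.ofList towels).map String.toList) pattern.toList := by
  rw [ofList_filter]
  have hpq : (PySem.Set.ofList towels : List String).filter (fun t => PySem.Str.isIn t pattern)
      = (PySem.Set.ofList towels : List String).filter
          ((fun cl => PySem.Chars.isIn cl pattern.toList) ∘ String.toList) := by
    apply List.filter_congr
    intro t _
    simp only [Function.comp_apply, PySem.Str.isIn_eq]
  rw [hpq, ← List.filter_map]
  exact W_filter _ _ pattern.toList
    (fun s _ hinf => (PySem.Chars.isIn_iff_infix s pattern.toList).mpr hinf)
    pattern.toList (List.infix_refl _)

theorem a_val (towels : List String) (hpre : "" ∉ towels) (pattern : String) :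
    (if (PySem.Set.ofList (towels.filter (fun t => PySem.Str.isIn t pattern)) : List String).length = 0
     then (0:Int)
     else (countingSearch ((PySem.Str.len pattern).toNat + 1)
       (PySem.Set.ofList (towels.filter (fun t => PySem.Str.isIn t pattern))) pattern PySem.Dict.empty).1)
    = W ((PySem.Set.ofList towels).map String.toList) pattern.toList := by
  by_cases hlen : (PySem.Set.ofList (towels.filter (fun t => PySem.Str.isIn t pattern)) : List String).length = 0
  · rw [if_pos hlen, ← relevant_W towels pattern, List.length_eq_zero_iff.mp hlen]
    exact (W_nil_ss _).symm
  · rw [if_neg hlen]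
    have hneR : ∀ s ∈ (PySem.Set.ofList (towels.filter (fun t => PySem.Str.isIn t pattern)) : List String),
        s ≠ "" := by
      intro s hs h0
      subst h0
      exact hpre (List.mem_of_mem_filter ((PySem.Set.mem_ofList _ _).mp hs))
    have hfuel : pattern.toList.length < (PySem.Str.len pattern).toNat + 1 := by
      rw [PySem.Str.len_eq, Int.toNat_natCast]
      omega
    have hok : CacheOK (PySem.Set.ofList (towels.filter (fun t => PySem.Str.isIn t pattern)))
        PySem.Dict.empty := by
      intro k v hk
      rw [PySem.Dict.get?_empty] at hk
      cases hk
    rw [(cs_correct _ _ hneR pattern PySem.Dict.empty hfuel hok).1]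
    exact relevant_W towels pattern

theorem part2_eq_alt (towels patterns : List String) (hpre : "" ∉ towels) :
    part2 towels patterns = part2_alt towels patterns := by
  have ha : part2 towels patterns = patterns.foldl (fun options pattern =>
      if (PySem.Set.ofList (towels.filter (fun t => PySem.Str.isIn t pattern)) : List String).length = 0
      then options
      else options + (countingSearch ((PySem.Str.len pattern).toNat + 1)
        (PySem.Set.ofList (towels.filter (fun t => PySem.Str.isIn t pattern))) pattern
        PySem.Dict.empty).1) 0 := rfl
  have hb : part2_alt towels patterns = patterns.foldl (fun total pattern =>
      total + PySem.List.pyGetD ((PySem.List.pyRange 1 (PySem.Str.len pattern + 1) 1).foldl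
        (dpStep ((PySem.Set.ofList towels : List String).filter (fun t => PySem.Str.isIn t pattern)) pattern)
        (List.replicate ((PySem.Str.len pattern) + 1).toNat 0)) 0 0) 0 := rfl
  have hneT : ∀ t ∈ (PySem.Set.ofList towels : List String), t ≠ "" := by
    intro t ht h0
    subst h0
    exact hpre ((PySem.Set.mem_ofList _ _).mp ht)
  have hneRel : ∀ (pat : String),
      ∀ t ∈ (PySem.Set.ofList towels : List String).filter (fun t => PySem.Str.isIn t pat), t ≠ "" :=
    fun pat t ht => hneT t (List.mem_of_mem_filter ht)
  rw [ha, hb,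
    PySem.List.foldl_congr_mem patterns
      (fun (options : Int) pattern =>
        if (PySem.Set.ofList (towels.filter (fun t => PySem.Str.isIn t pattern)) : List String).length = 0
        then options
        else options + (countingSearch ((PySem.Str.len pattern).toNat + 1)
          (PySem.Set.ofList (towels.filter (fun t => PySem.Str.isIn t pattern))) pattern
          PySem.Dict.empty).1)
      (fun (options : Int) pattern =>
        options + W ((PySem.Set.ofList towels).map String.toList) pattern.toList) 0
      (by
        intro acc pat _
        show (if (PySem.Set.ofList (towels.filter (fun t => PySem.Str.isIn t pat)) : List String).length = 0
          then acc
          else acc + (countingSearch ((PySem.Str.len pat).toNat + 1)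
            (PySem.Set.ofList (towels.filter (fun t => PySem.Str.isIn t pat))) pat
            PySem.Dict.empty).1)
          = acc + W ((PySem.Set.ofList towels).map String.toList) pat.toList
        rw [← a_val towels hpre pat]
        split_ifs <;> ring),
    PySem.List.foldl_congr_mem patterns
      (fun (total : Int) pattern =>
        total + PySem.List.pyGetD ((PySem.List.pyRange 1 (PySem.Str.len pattern + 1) 1).foldl
          (dpStep ((PySem.Set.ofList towels : List String).filter (fun t => PySem.Str.isIn t pattern)) pattern)
          (List.replicate ((PySem.Str.len pattern) + 1).toNat 0)) 0 0)
      (fun (total : Int) pattern =>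
        total + W ((PySem.Set.ofList towels).map String.toList) pattern.toList) 0
      (by
        intro acc pat _
        show acc + PySem.List.pyGetD ((PySem.List.pyRange 1 (PySem.Str.len pat + 1) 1).foldl
            (dpStep ((PySem.Set.ofList towels : List String).filter (fun t => PySem.Str.isIn t pat)) pat)
            (List.replicate ((PySem.Str.len pat) + 1).toNat 0)) 0 0
          = acc + W ((PySem.Set.ofList towels).map String.toList) pat.toList
        rw [dp_correct _ (hneRel pat) pat, ← ofList_filter, relevant_W towels pat])]

-- ===== VERDICT (by name: the statement is the Claim_ definition above) =====
theorem part2_spec : Claim_equal_part2 := by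
  intro towels patterns _ hpre
  rcases hpre with hpre | rfl
  · exact part2_eq_alt towels patterns hpre
  · rfl
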